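-- pv_equiv track=rewrite | github.com/eviiee/BJ_jja0122 | Programmers/250310/LV3 상담원 인원.py | getWaitTime
-- ===== SOURCE A (Python) =====
-- import heapq
--
-- def getWaitTime(meetings, n):
--
--     occupied_until = [0] * n
--     wait_time = 0
--
--     for st, length in meetings:
--         ed_time = heapq.heappop(occupied_until)
--         if ed_time > st :
--             wait_time += ed_time - st
--             st = ed_time
--         heapq.heappush(occupied_until, st + length)
--
--     return wait_time
-- ===== SOURCE B (Python) =====
-- def getWaitTime(meetings, n):
--     free = [0] * n
--     wait_time = 0
--     for st, length in meetings:
--         val = min(free)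
--         idx = free.index(val)
--         if val > st:
--             wait_time += val - st
--             st = val
--         free[idx] = st + length
--     return wait_time
-- ===== Notes on version B (the rewrite author's own statement) =====
-- stated objective: simpler
-- what changed: Replaced the heap (heappop/heappush with sift-up/sift-down) by a flat list of per-counselor free times updated by a linear min-scan (min + index + in-place write); correct because the wait only depends on the multiset of free times, of which both algorithms extract the minimum.
import Mathlib
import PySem

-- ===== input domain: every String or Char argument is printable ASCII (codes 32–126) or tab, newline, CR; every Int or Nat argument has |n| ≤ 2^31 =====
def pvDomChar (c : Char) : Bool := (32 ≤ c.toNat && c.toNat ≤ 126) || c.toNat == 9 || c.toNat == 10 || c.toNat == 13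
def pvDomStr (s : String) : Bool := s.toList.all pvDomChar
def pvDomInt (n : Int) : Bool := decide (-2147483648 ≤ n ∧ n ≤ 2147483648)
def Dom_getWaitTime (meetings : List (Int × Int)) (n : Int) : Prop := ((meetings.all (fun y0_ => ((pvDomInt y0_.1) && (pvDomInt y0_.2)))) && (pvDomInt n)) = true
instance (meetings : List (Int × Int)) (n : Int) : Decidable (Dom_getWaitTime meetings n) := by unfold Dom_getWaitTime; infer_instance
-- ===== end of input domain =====

-- B replaces A's binary heap by a flat list of free times with a linear min-scan (simpler; return value only, A pops/pushes a local list).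

-- ===== PORT A =====
-- transliteration of heapq (list indexing via getD; all reachable indices are in range)
def hGet (l : List Int) (i : Nat) : Int := l.getD i 0

def siftdownLoop (heap : List Int) (startpos pos : Nat) (newitem : Int) : List Int :=
  if pos > startpos then
    if newitem < hGet heap ((pos - 1) / 2) then
      siftdownLoop (heap.set pos (hGet heap ((pos - 1) / 2))) startpos ((pos - 1) / 2) newitem
    else heap.set pos newitem
  else heap.set pos newitem
termination_by pos
decreasing_by omega

-- heapq._siftdown(heap, startpos, pos)
def pySiftdown (heap : List Int) (startpos pos : Nat) : List Int :=
  siftdownLoop heap startpos pos (hGet heap pos)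

def siftupLoop (heap : List Int) (pos childpos : Nat) : List Int × Nat :=
  if childpos < heap.length then
    if childpos + 1 < heap.length ∧ ¬ (hGet heap childpos < hGet heap (childpos + 1)) then
      siftupLoop (heap.set pos (hGet heap (childpos + 1))) (childpos + 1) (2 * (childpos + 1) + 1)
    else
      siftupLoop (heap.set pos (hGet heap childpos)) childpos (2 * childpos + 1)
  else (heap, pos)
termination_by heap.length - childpos
decreasing_by all_goals simp only [List.length_set]; omega

-- heapq._siftup(heap, pos): sift to a leaf, place newitem, then _siftdown
def pySiftup (heap : List Int) (pos : Nat) : List Int :=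
  let newitem := hGet heap pos
  let r := siftupLoop heap pos (2 * pos + 1)
  pySiftdown (r.1.set r.2 newitem) pos r.2

-- heapq.heappop: none = IndexError on the empty list
def pyHeappop (heap : List Int) : Option (Int × List Int) :=
  match heap with
  | [] => none
  | _ =>
    let lastelt := hGet heap (heap.length - 1)
    let rest := heap.dropLast
    if rest.isEmpty then some (lastelt, rest)
    else some (hGet rest 0, pySiftup (rest.set 0 lastelt) 0)

def pyHeappush (heap : List Int) (item : Int) : List Int :=
  pySiftdown (heap ++ [item]) 0 heap.length

def stepA (s : Option (List Int × Int)) (m : Int × Int) : Option (List Int × Int) :=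
  match s with
  | none => none
  | some (heap, wait) =>
    match pyHeappop heap with
    | none => none
    | some (ed, h) =>
      if ed > m.1 then some (pyHeappush h (ed + m.2), wait + (ed - m.1))
      else some (pyHeappush h (m.1 + m.2), wait)

def getWaitTime (meetings : List (Int × Int)) (n : Int) : Int :=
  match meetings.foldl stepA (some (List.replicate n.toNat 0, 0)) with
  | some (_, w) => w
  | none => 0

-- ===== PORT B =====
def stepB (s : Option (List Int × Int)) (m : Int × Int) : Option (List Int × Int) :=
  match s with
  | none => none
  | some (free, wait) =>
    match PySem.List.min? free (fun x => x) with
    | none => none                               -- min([]) = ValueError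
    | some val =>
      match PySem.List.index? free val with
      | none => none
      | some idx =>
        if val > m.1 then some (free.set idx (val + m.2), wait + (val - m.1))
        else some (free.set idx (m.1 + m.2), wait)

def getWaitTime_alt (meetings : List (Int × Int)) (n : Int) : Int :=
  match meetings.foldl stepB (some (List.replicate n.toNat 0, 0)) with
  | some (_, w) => w
  | none => 0

-- ===== PRECONDITION & SPEC =====
-- Pre_ excludes n ≤ 0 with nonempty meetings: there A raises IndexError (heappop of an
-- empty heap) and B raises ValueError (min of an empty list); neither returns a value.
def Pre_getWaitTime (meetings : List (Int × Int)) (n : Int) : Prop := meetings = [] ∨ 1 ≤ n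
instance (meetings : List (Int × Int)) (n : Int) : Decidable (Pre_getWaitTime meetings n) := by unfold Pre_getWaitTime; infer_instance

def pvWitness_getWaitTime : (List (Int × Int)) × Int := ([(0, 5), (2, 3), (3, 4)], 2)

def Spec_getWaitTime (meetings : List (Int × Int)) (n : Int) (out : Int) : Prop := out = getWaitTime_alt meetings n
instance (meetings : List (Int × Int)) (n : Int) (out : Int) : Decidable (Spec_getWaitTime meetings n out) := by unfold Spec_getWaitTime; infer_instance

-- ===== CLAIM (what is proved, stated in full; the proofs are below) =====
def Claim_equal_getWaitTime : Prop := ∀ (meetings : List (Int × Int)) (n : Int), Dom_getWaitTime meetings n → Pre_getWaitTime meetings n → Spec_getWaitTime meetings n (getWaitTime meetings n)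

-- ===== LEMMAS AND PROOFS =====

-- heap-shape predicates (par j = (j-1)/2)
def IsHeap (l : List Int) : Prop := ∀ j, j < l.length → 1 ≤ j → hGet l ((j - 1) / 2) ≤ hGet l j
-- all parent edges except the one INTO p
def AH (l : List Int) (p : Nat) : Prop := ∀ j, j < l.length → 1 ≤ j → j ≠ p → hGet l ((j - 1) / 2) ≤ hGet l j
-- children of p dominate p's parent
def SkipP (l : List Int) (p : Nat) : Prop := ∀ j, j < l.length → 1 ≤ j → (j - 1) / 2 = p → 1 ≤ p → hGet l ((p - 1) / 2) ≤ hGet l j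
-- siftupLoop invariant part (b)
def SkipU (l : List Int) (p : Nat) : Prop := ∀ j, j < l.length → 1 ≤ j → (j - 1) / 2 = p → 1 ≤ p → hGet l ((p - 1) / 2) ≤ hGet l j
-- all parent edges except those OUT of p (siftupLoop hole invariant part (a))
def HU (l : List Int) (p : Nat) : Prop := ∀ j, j < l.length → 1 ≤ j → (j - 1) / 2 ≠ p → hGet l ((j - 1) / 2) ≤ hGet l j


lemma hGet_set (l : List Int) (i j : Nat) (x : Int) :
    hGet (l.set i x) j = if i = j ∧ j < l.length then x else hGet l j := by
  simp only [hGet, List.getD_eq_getElem?_getD, List.getElem?_set]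
  split_ifs with h1 h2 h3 h4 <;> simp_all

lemma hGet_set_ne (l : List Int) (i j : Nat) (x : Int) (hij : i ≠ j) :
    hGet (l.set i x) j = hGet l j := by rw [hGet_set]; simp [hij]

lemma hGet_set_self (l : List Int) (i : Nat) (x : Int) (hi : i < l.length) :
    hGet (l.set i x) i = x := by rw [hGet_set]; simp [hi]

lemma hGet_eq_getElem (l : List Int) (i : Nat) (hi : i < l.length) : hGet l i = l[i] := by
  simp [hGet, List.getD_eq_getElem?_getD, List.getElem?_eq_getElem hi]

lemma hGet_append_lt (l : List Int) (x : Int) (j : Nat) (hj : j < l.length) :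
    hGet (l ++ [x]) j = hGet l j := by
  rw [hGet_eq_getElem _ _ (by simp; omega), hGet_eq_getElem _ _ hj,
      List.getElem_append_left hj]

lemma hGet_append_self (l : List Int) (x : Int) : hGet (l ++ [x]) l.length = x := by
  rw [hGet_eq_getElem _ _ (by simp)]
  simp

lemma hGet_dropLast (l : List Int) (j : Nat) (hj : j < l.length - 1) :
    hGet l.dropLast j = hGet l j := by
  rw [hGet_eq_getElem _ _ (by simp [List.length_dropLast]; omega),
      hGet_eq_getElem _ _ (by omega), List.getElem_dropLast]




lemma perm_set (l : List Int) (j : Nat) (x : Int) (h : j < l.length) :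
    List.Perm (hGet l j :: l.set j x) (x :: l) := by
  induction l generalizing j with
  | nil => simp at h
  | cons a t ih =>
    cases j with
    | zero => simpa [hGet] using List.Perm.swap x a t
    | succ j =>
      simp only [List.length_cons, Nat.succ_lt_succ_iff] at h
      have : hGet (a :: t) (j + 1) = hGet t j := by simp [hGet]
      rw [this, List.set_cons_succ]
      have s1 : List.Perm (hGet t j :: a :: t.set j x) (a :: hGet t j :: t.set j x) :=
        List.Perm.swap _ _ _
      have s2 : List.Perm (a :: hGet t j :: t.set j x) (a :: x :: t) := (ih j h).cons a
      have s3 : List.Perm (a :: x :: t) (x :: a :: t) := List.Perm.swap _ _ _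
      exact (s1.trans s2).trans s3

lemma ms_set (l : List Int) (j : Nat) (x : Int) (h : j < l.length) :
    (↑(l.set j x) : Multiset Int) + {hGet l j} = (↑l : Multiset Int) + {x} := by
  have h2 := Multiset.coe_eq_coe.mpr (perm_set l j x h)
  rw [add_comm _ ({hGet l j} : Multiset Int), add_comm _ ({x} : Multiset Int),
      Multiset.singleton_add, Multiset.singleton_add]
  exact h2

lemma ms_set_swap (l : List Int) (i j : Nat) (x : Int) (hij : i ≠ j)
    (hi : i < l.length) (hj : j < l.length) :
    (↑((l.set i (hGet l j)).set j x) : Multiset Int) = (↑(l.set i x) : Multiset Int) := by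
  have hj' : j < (l.set i (hGet l j)).length := by simpa using hj
  have h1 := ms_set (l.set i (hGet l j)) j x hj'
  have hg : hGet (l.set i (hGet l j)) j = hGet l j := by
    rw [hGet_set]; simp [hij]
  rw [hg] at h1
  have h2 := ms_set l i (hGet l j) hi
  have h3 := ms_set l i x hi
  have key : (↑((l.set i (hGet l j)).set j x) : Multiset Int) + ({hGet l j} + {hGet l i}) =
      (↑(l.set i x) : Multiset Int) + ({hGet l j} + {hGet l i}) := by
    calc (↑((l.set i (hGet l j)).set j x) : Multiset Int) + ({hGet l j} + {hGet l i})
        = ((↑((l.set i (hGet l j)).set j x) : Multiset Int) + {hGet l j}) + {hGet l i} := by abel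
      _ = ((↑(l.set i (hGet l j)) : Multiset Int) + {x}) + {hGet l i} := by rw [h1]
      _ = ((↑(l.set i (hGet l j)) : Multiset Int) + {hGet l i}) + {x} := by abel
      _ = ((↑l : Multiset Int) + {hGet l j}) + {x} := by rw [h2]
      _ = ((↑l : Multiset Int) + {x}) + {hGet l j} := by abel
      _ = ((↑(l.set i x) : Multiset Int) + {hGet l i}) + {hGet l j} := by rw [h3]
      _ = _ := by abel
  exact add_right_cancel key

lemma sdl_ms (p : Nat) : ∀ (l : List Int) (s : Nat) (newitem : Int), p < l.length →
    (↑(siftdownLoop l s p newitem) : Multiset Int) = (↑(l.set p newitem) : Multiset Int) := by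
  induction p using Nat.strong_induction_on with
  | _ p ih =>
    intro l s newitem hp
    rw [siftdownLoop]
    split_ifs with h1 h2
    · have hpar : (p - 1) / 2 < p := by omega
      have hlen : (p - 1) / 2 < (l.set p (hGet l ((p - 1) / 2))).length := by
        simp only [List.length_set]; omega
      rw [ih _ hpar _ s newitem hlen]
      exact ms_set_swap l p ((p - 1) / 2) newitem (by omega) hp (by omega)
    · rfl
    · rfl

lemma sdl_len (p : Nat) : ∀ (l : List Int) (s : Nat) (newitem : Int),
    (siftdownLoop l s p newitem).length = l.length := by
  induction p using Nat.strong_induction_on with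
  | _ p ih =>
    intro l s newitem
    rw [siftdownLoop]
    split_ifs with h1 h2
    · rw [ih _ (by omega : (p - 1) / 2 < p)]; simp
    · simp
    · simp

lemma sdl_heap (p : Nat) : ∀ (l : List Int) (newitem : Int), p < l.length →
    AH (l.set p newitem) p → SkipP (l.set p newitem) p →
    IsHeap (siftdownLoop l 0 p newitem) := by
  induction p using Nat.strong_induction_on with
  | _ p ih =>
    intro l newitem hp hAH hSk
    have hlenV : (l.set p newitem).length = l.length := by simp
    rw [siftdownLoop]
    split_ifs with h1 h2
    · -- move the parent down, recurse at pp = (p-1)/2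
      set pp := (p - 1) / 2 with hppdef
      have hpp_lt : pp < p := by omega
      have hppl : pp < l.length := by omega
      have hVpp : hGet (l.set p newitem) pp = hGet l pp := hGet_set_ne _ _ _ _ (by omega)
      have hVp : hGet (l.set p newitem) p = newitem := hGet_set_self _ _ _ hp
      refine ih pp hpp_lt _ newitem (by simp; omega) ?_ ?_
      · -- AH ((l.set p parent).set pp newitem) pp
        intro j hj hj1 hjpp
        simp only [List.length_set] at hj
        have hVj : ∀ q, q ≠ p → q ≠ pp →
            hGet ((l.set p (hGet l pp)).set pp newitem) q = hGet l q := by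
          intro q h1 h2
          rw [hGet_set_ne _ _ _ _ (Ne.symm h2), hGet_set_ne _ _ _ _ (Ne.symm h1)]
        have hV'pp : hGet ((l.set p (hGet l pp)).set pp newitem) pp = newitem :=
          hGet_set_self _ _ _ (by simp; omega)
        have hV'p : hGet ((l.set p (hGet l pp)).set pp newitem) p = hGet l pp := by
          rw [hGet_set_ne _ _ _ _ (by omega), hGet_set_self _ _ _ hp]
        by_cases hjp : j = p
        · subst hjp
          have : (j - 1) / 2 = pp := hppdef.symm
          rw [this, hV'pp, hV'p]
          exact le_of_lt h2
        · by_cases hq : (j - 1) / 2 = pp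
          · -- sibling of p below pp
            rw [hq, hV'pp, hVj j hjp hjpp]
            have := hAH j (by omega) hj1 hjp
            rw [hq, hVpp, hGet_set_ne _ _ _ _ (Ne.symm hjp)] at this
            exact le_of_lt (lt_of_lt_of_le h2 this)
          · by_cases hqp : (j - 1) / 2 = p
            · -- child of p
              have hjne : j ≠ pp := hjpp
              have hjnp : j ≠ p := hjp
              rw [hqp, hV'p, hVj j hjnp hjne]
              have := hSk j (by omega) hj1 hqp (by omega)
              rw [hVpp, hGet_set_ne _ _ _ _ (Ne.symm hjnp)] at this
              exact this
            · -- untouched edge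
              rw [hVj j hjp hjpp, hVj _ hqp hq]
              have := hAH j (by omega) hj1 hjp
              rw [hGet_set_ne _ _ _ _ (Ne.symm hjp), hGet_set_ne _ _ _ _ (Ne.symm hqp)] at this
              exact this
      · -- SkipP ((l.set p parent).set pp newitem) pp
        intro j hj hj1 hq hpp1
        simp only [List.length_set] at hj
        have hV'p : hGet ((l.set p (hGet l pp)).set pp newitem) p = hGet l pp := by
          rw [hGet_set_ne _ _ _ _ (by omega), hGet_set_self _ _ _ hp]
        have hppp_lt : (pp - 1) / 2 < pp := by omega
        have hV'ppp : hGet ((l.set p (hGet l pp)).set pp newitem) ((pp - 1) / 2) = hGet l ((pp - 1) / 2) := by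
          rw [hGet_set_ne _ _ _ _ (by omega), hGet_set_ne _ _ _ _ (by omega)]
        -- parent edge into pp in V: hGet l (ppp) ≤ hGet l pp
        have hedge : hGet l ((pp - 1) / 2) ≤ hGet l pp := by
          have := hAH pp (by omega) hpp1 (by omega)
          rw [hGet_set_ne _ _ _ _ (by omega), hGet_set_ne _ _ _ _ (by omega)] at this
          exact this
        rw [hV'ppp]
        by_cases hjp : j = p
        · subst hjp; rw [hV'p]; exact hedge
        · have hjpp : j ≠ pp := by omega
          rw [hGet_set_ne _ _ _ _ (Ne.symm hjpp), hGet_set_ne _ _ _ _ (Ne.symm hjp)]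
          have := hAH j (by omega) hj1 hjp
          rw [hq, hGet_set_ne _ _ _ _ (by omega), hGet_set_ne _ _ _ _ (Ne.symm hjp)] at this
          exact le_trans hedge this
    · -- stop: newitem ≥ parent
      intro j hj hj1
      simp only [List.length_set] at hj
      by_cases hjp : j = p
      · subst hjp
        rw [hGet_set_self _ _ _ hp, hGet_set_ne _ _ _ _ (by omega)]
        omega
      · exact hAH j (by simp; omega) hj1 hjp
    · -- p = 0
      intro j hj hj1
      simp only [List.length_set] at hj
      exact hAH j (by simp; omega) hj1 (by omega)


lemma sul_step (l : List Int) (pos c : Nat) (hpos : pos < l.length) (hc : c < l.length)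
    (hcpar : (c - 1) / 2 = pos) (hcgt : pos < c)
    (hmin : ∀ j, j < l.length → 1 ≤ j → (j - 1) / 2 = pos → hGet l c ≤ hGet l j)
    (hHU : HU l pos) (hSk : SkipU l pos) :
    HU (l.set pos (hGet l c)) c ∧ SkipU (l.set pos (hGet l c)) c := by
  have hvpos : hGet (l.set pos (hGet l c)) pos = hGet l c := hGet_set_self _ _ _ hpos
  constructor
  · intro j hj hj1 hq
    simp only [List.length_set] at hj
    by_cases hjpos : j = pos
    · subst hjpos
      have hq' : (j - 1) / 2 ≠ j := by omega
      rw [hGet_set_ne _ _ _ _ (Ne.symm hq'), hvpos]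
      exact hSk c hc (by omega) hcpar (by omega)
    · rw [hGet_set_ne _ _ _ _ (Ne.symm hjpos)]
      by_cases hqpos : (j - 1) / 2 = pos
      · rw [hqpos, hvpos]
        exact hmin j hj hj1 hqpos
      · rw [hGet_set_ne _ _ _ _ (Ne.symm hqpos)]
        exact hHU j hj hj1 hqpos
  · intro j hj hj1 hq h1c
    simp only [List.length_set] at hj
    have hjpos : j ≠ pos := by omega
    rw [hcpar, hvpos, hGet_set_ne _ _ _ _ (Ne.symm hjpos)]
    have := hHU j hj hj1 (by omega)
    rw [hq] at this
    exact this

lemma sul_spec (k : Nat) : ∀ (l : List Int) (pos : Nat), l.length - (2 * pos + 1) = k →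
    pos < l.length → HU l pos → SkipU l pos →
    (siftupLoop l pos (2 * pos + 1)).1.length = l.length ∧
    (siftupLoop l pos (2 * pos + 1)).2 < l.length ∧
    l.length ≤ 2 * (siftupLoop l pos (2 * pos + 1)).2 + 1 ∧
    HU (siftupLoop l pos (2 * pos + 1)).1 (siftupLoop l pos (2 * pos + 1)).2 ∧
    SkipU (siftupLoop l pos (2 * pos + 1)).1 (siftupLoop l pos (2 * pos + 1)).2 ∧
    (∀ x, (↑((siftupLoop l pos (2 * pos + 1)).1.set (siftupLoop l pos (2 * pos + 1)).2 x) : Multiset Int)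
        = (↑(l.set pos x) : Multiset Int)) := by
  induction k using Nat.strong_induction_on with
  | _ k ih =>
    intro l pos hk hpos hHU hSk
    rw [siftupLoop]
    split_ifs with h1 h2
    · -- right child 2*pos+2 chosen
      have hc : 2 * pos + 2 < l.length := by omega
      have hmin : ∀ j, j < l.length → 1 ≤ j → (j - 1) / 2 = pos → hGet l (2 * pos + 1 + 1) ≤ hGet l j := by
        intro j hj hj1 hq
        have : j = 2 * pos + 1 ∨ j = 2 * pos + 2 := by omega
        rcases this with h | h <;> subst h
        · omega
        · exact le_refl _
      obtain ⟨hu, hsk⟩ := sul_step l pos (2 * pos + 1 + 1) hpos (by omega) (by omega) (by omega) hmin hHU hSk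
      have := ih (l.length - (2 * (2 * pos + 1 + 1) + 1)) (by omega)
        (l.set pos (hGet l (2 * pos + 1 + 1))) (2 * pos + 1 + 1) (by simp) (by simp; omega) hu hsk
      refine ⟨?_, ?_, ?_, ?_, ?_, ?_⟩
      · rw [this.1]; simp
      · have := this.2.1; simpa using this
      · have := this.2.2.1; simpa using this
      · exact this.2.2.2.1
      · exact this.2.2.2.2.1
      · intro x
        rw [this.2.2.2.2.2 x]
        exact ms_set_swap l pos (2 * pos + 1 + 1) x (by omega) hpos (by omega)
    · -- left child 2*pos+1 chosen
      have hmin : ∀ j, j < l.length → 1 ≤ j → (j - 1) / 2 = pos → hGet l (2 * pos + 1) ≤ hGet l j := by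
        intro j hj hj1 hq
        have : j = 2 * pos + 1 ∨ j = 2 * pos + 2 := by omega
        rcases this with h | h <;> subst h
        · exact le_refl _
        · rw [not_and_or, not_not] at h2
          rcases h2 with h2 | h2
          · omega
          · exact le_of_lt h2
      obtain ⟨hu, hsk⟩ := sul_step l pos (2 * pos + 1) hpos (by omega) (by omega) (by omega) hmin hHU hSk
      have := ih (l.length - (2 * (2 * pos + 1) + 1)) (by omega)
        (l.set pos (hGet l (2 * pos + 1))) (2 * pos + 1) (by simp) (by simp; omega) hu hsk
      refine ⟨?_, ?_, ?_, ?_, ?_, ?_⟩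
      · rw [this.1]; simp
      · have := this.2.1; simpa using this
      · have := this.2.2.1; simpa using this
      · exact this.2.2.2.1
      · exact this.2.2.2.2.1
      · intro x
        rw [this.2.2.2.2.2 x]
        exact ms_set_swap l pos (2 * pos + 1) x (by omega) hpos (by omega)
    · -- leaf reached
      exact ⟨rfl, hpos, by omega, hHU, hSk, fun x => rfl⟩

lemma root_min (l : List Int) (hh : IsHeap l) : ∀ i, i < l.length → hGet l 0 ≤ hGet l i := by
  intro i
  induction i using Nat.strong_induction_on with
  | _ i ih =>
    intro hi
    rcases Nat.eq_zero_or_pos i with h0 | h1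
    · subst h0; exact le_refl _
    · exact le_trans (ih ((i - 1) / 2) (by omega) (by omega)) (hh i hi (by omega))

lemma push_spec (h : List Int) (x : Int) (hh : IsHeap h) :
    IsHeap (pyHeappush h x) ∧ ((↑(pyHeappush h x) : Multiset Int) = x ::ₘ (↑h : Multiset Int)) ∧
    (pyHeappush h x).length = h.length + 1 := by
  have hL : h.length < (h ++ [x]).length := by simp
  have hpush : pyHeappush h x = siftdownLoop (h ++ [x]) 0 h.length x := by
    simp only [pyHeappush, pySiftdown, hGet_append_self]
  have hset : (h ++ [x]).set h.length x = h ++ [x] := by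
    apply List.ext_getElem (by simp)
    intro i h1 h2
    by_cases hi : i = h.length
    · subst hi; simp
    · simp only [List.getElem_set]
      rw [if_neg (by omega)]
  refine ⟨?_, ?_, ?_⟩
  · rw [hpush]
    apply sdl_heap h.length (h ++ [x]) x hL
    · intro j hj hj1 hjL
      rw [hset] at hj ⊢
      simp only [List.length_append, List.length_singleton] at hj
      have hjlt : j < h.length := by omega
      rw [hGet_append_lt _ _ _ hjlt, hGet_append_lt _ _ _ (by omega)]
      exact hh j hjlt hj1
    · intro j hj hj1 hq h1L
      rw [hset] at hj
      simp only [List.length_append, List.length_singleton] at hj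
      omega
  · rw [hpush, sdl_ms h.length (h ++ [x]) 0 x hL, hset]
    have h1 : (↑(h ++ [x]) : Multiset Int) = (↑h : Multiset Int) + (↑[x] : Multiset Int) := by
      exact_mod_cast (Multiset.coe_add h [x]).symm
    rw [h1, show (↑[x] : Multiset Int) = ({x} : Multiset Int) from rfl,
        add_comm, Multiset.singleton_add]
  · rw [hpush, sdl_len]
    simp

lemma pop_spec (h : List Int) (hne : h ≠ []) (hh : IsHeap h) :
    ∃ m h', pyHeappop h = some (m, h') ∧ IsHeap h' ∧
      (∀ y ∈ h, m ≤ y) ∧ (↑h : Multiset Int) = m ::ₘ (↑h' : Multiset Int) ∧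
      h'.length + 1 = h.length := by
  have hL : 1 ≤ h.length := by
    cases h
    · exact absurd rfl hne
    · simp
  by_cases hL1 : h.length = 1
  · obtain ⟨a, rfl⟩ := List.length_eq_one_iff.mp hL1
    refine ⟨a, [], ?_, ?_, ?_, ?_, ?_⟩
    · simp [pyHeappop, hGet]
    · intro j hj hj1; simp at hj
    · intro y hy; simp at hy; omega
    · simp
    · simp
  · -- h.length ≥ 2
    have hL2 : 2 ≤ h.length := by omega
    have hrestlen : h.dropLast.length = h.length - 1 := by simp
    have hrestne : ¬ h.dropLast.isEmpty := by
      rw [List.isEmpty_iff_length_eq_zero]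
      omega
    have hpop : pyHeappop h = some (hGet h.dropLast 0,
        pySiftup (h.dropLast.set 0 (hGet h (h.length - 1))) 0) := by
      cases h with
      | nil => exact absurd rfl hne
      | cons a t => simp only [pyHeappop, hrestne, if_false, Bool.false_eq_true]
    set lastelt := hGet h (h.length - 1) with hlastdef
    set l1 := h.dropLast.set 0 lastelt with hl1def
    have hl1len : l1.length = h.length - 1 := by simp [hl1def, hrestlen]
    have h0l1 : 0 < l1.length := by omega
    -- sul_spec preconditions
    have hHU : HU l1 0 := by
      intro j hj hj1 hq
      rw [hl1len] at hj
      rw [hl1def, hGet_set_ne _ _ _ _ (by omega), hGet_set_ne _ _ _ _ (by omega),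
          hGet_dropLast _ _ (by omega), hGet_dropLast _ _ (by omega)]
      exact hh j (by omega) hj1
    have hSkU : SkipU l1 0 := by
      intro j hj hj1 hq h10
      omega
    obtain ⟨hr1len, hr2lt, hr2leaf, hu, _, hms⟩ :=
      sul_spec (l1.length - 1) l1 0 rfl h0l1 hHU hSkU
    set r := siftupLoop l1 0 1 with hrdef
    have hr2lt' : r.2 < r.1.length := by rw [hr1len]; exact hr2lt
    have hnew0 : hGet l1 0 = lastelt := by
      rw [hl1def, hGet_set_self _ _ _ (by rw [hrestlen]; omega)]
    have hsiftup : pySiftup l1 0 = siftdownLoop (r.1.set r.2 lastelt) 0 r.2 lastelt := by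
      simp only [pySiftup, pySiftdown, hnew0]
      rw [show (2 * 0 + 1) = 1 from rfl, ← hrdef,
          hGet_set_self _ _ _ hr2lt']
    have hsetset : (r.1.set r.2 lastelt).set r.2 lastelt = r.1.set r.2 lastelt := List.set_set ..
    have hheap' : IsHeap (pySiftup l1 0) := by
      rw [hsiftup]
      apply sdl_heap r.2 (r.1.set r.2 lastelt) lastelt (by simp [hr2lt'])
      · rw [hsetset]
        intro j hj hj1 hjne
        simp only [List.length_set] at hj
        have hqne : (j - 1) / 2 ≠ r.2 := by
          intro hq
          have : 2 * r.2 + 1 ≤ j := by omega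
          rw [hr1len] at hj
          omega
        rw [hGet_set_ne _ _ _ _ (Ne.symm hjne), hGet_set_ne _ _ _ _ (Ne.symm hqne)]
        exact hu j hj hj1 hqne
      · rw [hsetset]
        intro j hj hj1 hq h1r
        simp only [List.length_set] at hj
        rw [hr1len] at hj
        omega
    have hms' : (↑(pySiftup l1 0) : Multiset Int) = (↑l1 : Multiset Int) := by
      rw [hsiftup, sdl_ms r.2 _ 0 lastelt (by simp [hr2lt']), hsetset, hms lastelt]
      have hss : l1.set 0 lastelt = l1 := by rw [hl1def]; exact List.set_set ..
      rw [hss]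
    have hlen' : (pySiftup l1 0).length + 1 = h.length := by
      rw [hsiftup, sdl_len]
      simp only [List.length_set]
      omega
    have hm0 : hGet h.dropLast 0 = hGet h 0 := hGet_dropLast _ _ (by omega)
    refine ⟨hGet h.dropLast 0, pySiftup l1 0, hpop, hheap', ?_, ?_, hlen'⟩
    · intro y hy
      obtain ⟨i, hi, rfl⟩ := List.mem_iff_getElem.mp hy
      rw [hm0, ← hGet_eq_getElem _ _ hi]
      exact root_min h hh i hi
    · have hsplit : h.dropLast ++ [lastelt] = h := by
        rw [hlastdef, hGet_eq_getElem _ _ (by omega)]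
        have : h[h.length - 1] = h.getLast hne := (List.getLast_eq_getElem hne).symm
        rw [this]
        exact List.dropLast_append_getLast hne
      have hmsh : (↑h : Multiset Int) = (↑h.dropLast : Multiset Int) + {lastelt} := by
        conv_lhs => rw [← hsplit]
        exact_mod_cast (Multiset.coe_add h.dropLast [lastelt])
      have hms1 : (↑l1 : Multiset Int) + {hGet h.dropLast 0} =
          (↑h.dropLast : Multiset Int) + {lastelt} := ms_set h.dropLast 0 lastelt (by omega)
      rw [hms', hmsh, ← hms1, add_comm, Multiset.singleton_add]

lemma fold_inv (ms : List (Int × Int)) : ∀ (heap free : List Int) (w : Int),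
    IsHeap heap → (↑heap : Multiset Int) = (↑free : Multiset Int) → free ≠ [] →
    ∃ h' f' w', ms.foldl stepA (some (heap, w)) = some (h', w') ∧
                ms.foldl stepB (some (free, w)) = some (f', w') := by
  induction ms with
  | nil => exact fun heap free w _ _ _ => ⟨heap, free, w, rfl, rfl⟩
  | cons m ms ih =>
    intro heap free w hh hEq hfne
    have hne : heap ≠ [] := by
      intro hcon
      subst hcon
      simp only [Multiset.coe_nil] at hEq
      exact hfne ((Multiset.coe_eq_zero _).mp hEq.symm)
    obtain ⟨mA, h', hpop, hh', hmin, hmsA, hlen⟩ := pop_spec heap hne hh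
    cases hmv : PySem.List.min? free (fun x => x) with
    | none => exact absurd ((PySem.List.min?_eq_none_iff _ _).mp hmv) hfne
    | some val =>
    cases hidx : PySem.List.index? free val with
    | none => exact absurd ((PySem.List.index?_eq_none_iff _ _).mp hidx) (fun hcon => hcon (PySem.List.min?_mem hmv))
    | some idx =>
    obtain ⟨hklt, hfk, _⟩ := PySem.List.getElem_of_index?_eq_some hidx
    have hvalmem : val ∈ free := PySem.List.min?_mem hmv
    have hmem_coe : ∀ y : Int, y ∈ free ↔ y ∈ heap := by
      intro y
      rw [← Multiset.mem_coe, ← Multiset.mem_coe, hEq]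
    have hveq : val = mA := by
      have hmAfree : mA ∈ free := by
        rw [hmem_coe]
        have : mA ∈ (↑heap : Multiset Int) := by rw [hmsA]; exact Multiset.mem_cons_self _ _
        exact Multiset.mem_coe.mp this
      have h1 : val ≤ mA := PySem.List.min?_isMin hmv mA hmAfree
      have h2 : mA ≤ val := hmin val ((hmem_coe val).mp hvalmem)
      omega
    have hgetidx : hGet free idx = mA := by
      rw [hGet_eq_getElem _ _ hklt, hfk, hveq]
    -- the common continuation
    have hcont : ∀ x : Int, ∀ w2 : Int,
        ∃ h2 f2 w3, ms.foldl stepA (some (pyHeappush h' x, w2)) = some (h2, w3) ∧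
                    ms.foldl stepB (some (free.set idx x, w2)) = some (f2, w3) := by
      intro x w2
      obtain ⟨hph, hpm, hpl⟩ := push_spec h' x hh'
      apply ih _ _ _ hph
      · have h1 := ms_set free idx x hklt
        rw [hgetidx] at h1
        have h2 : (x ::ₘ (↑h' : Multiset Int)) + {mA} = ((↑free : Multiset Int)) + {x} := by
          rw [← hEq, hmsA, ← Multiset.singleton_add x, ← Multiset.singleton_add mA]
          abel
        rw [hpm]
        exact add_right_cancel (h2.trans h1.symm)
      · intro hcon
        have := congrArg List.length hcon
        simp only [List.length_set] at this
        exact hfne (List.length_eq_zero_iff.mp this)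
    simp only [List.foldl_cons, stepA, stepB, hpop, hmv, hidx, ← hveq]
    by_cases hc : val > m.1
    · rw [if_pos hc, if_pos hc]
      exact hcont (val + m.2) (w + (val - m.1))
    · rw [if_neg hc, if_neg hc]
      exact hcont (m.1 + m.2) w

-- ===== VERDICT (by name: the statement is the Claim_ definition above) =====
theorem getWaitTime_spec : Claim_equal_getWaitTime := by
  intro meetings n _ hpre
  unfold Spec_getWaitTime
  rcases hpre with hnil | hn
  · subst hnil; rfl
  · have hlen : (List.replicate n.toNat (0 : Int)).length = n.toNat := by simp
    have hfne : List.replicate n.toNat (0 : Int) ≠ [] := by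
      intro hcon
      rw [hcon] at hlen
      simp at hlen
      omega
    have hh : IsHeap (List.replicate n.toNat (0 : Int)) := by
      intro j hj hj1
      rw [hlen] at hj
      rw [hGet_eq_getElem _ _ (by rw [hlen]; omega), hGet_eq_getElem _ _ (by rw [hlen]; omega)]
      simp
    obtain ⟨h', f', w', hA, hB⟩ :=
      fold_inv meetings (List.replicate n.toNat 0) (List.replicate n.toNat 0) 0 hh rfl hfne
    simp only [getWaitTime, getWaitTime_alt, hA, hB]
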